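-- pv_equiv track=rewrite | github.com/SabrinaLee1/CSE231 | project04.py | encode_image
-- ===== SOURCE A (Python) =====
-- def numtobase( N, B ):
--     """
--     Converts a decimal number to a string in its binary format.
--     N: a non-negative interger (int)
--     cannot be a float
--     B: base value for conversion (int)
--     must be between 2 and 10
--     Returns: the string binary format of the entered interger (str)
--     """
--     binarystring =  ''
--     if N == 0:
--         return ''
--     while N > 0:
--         binarystring += str(N % B)
--         N = N//B
--     return binarystring[::-1].zfill(8)
--
-- def text_tobin(text):
--     """
--     Converts a string of text to its binary string format.
--     text: a string of letters (str)
--     Returns:the binary string format of the given letters (str)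
--     """
--     newtext= ''
--     for ch in (text):
--         dec = ord(ch)
--         changed_text = numtobase(dec, 2)
--         newtext += changed_text
--     return newtext
--
-- def encode_image(image,text,N):
--     """
--     Embeds a given text into a binary string image.
--     image: a binary string that represents an image (str)
--     text: a string message of letters to be hidden in the image (str)
--     N: a number that represents how many bits are in each pixel (int)
--     Returns: the encoded binary string with the new embeded message (str)
--     """
--     encoded_image = ''
--     if image == '':
--         return ''
--     if text == '':
--         return image
--     newtext = text_tobin(text)
--     if len(newtext) > len(image):
--         return None
--     count = 0
--     for ch in range(0, len(image)):
--         #check to see if image or newtext should be added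
--         if (ch +1) % int(N) != 0 or ch == 0:
--             encoded_image += image[ch]
--         else:
--             try:
--                 #check to see if the values are equal in order to add
--                 if image[ch] == newtext[count]:
--                     encoded_image += image[ch]
--                 else:
--                     encoded_image += newtext[count]
--             #fix for when there is still image left but no text
--             except IndexError:
--                 encoded_image += image[ch]
--             count += 1
--     return encoded_image
-- ===== SOURCE B (Python) =====
-- def encode_image(image, text, N):
--     if image == '':
--         return ''
--     if text == '':
--         return image
--     bits = ''.join(format(ord(c), 'b').zfill(8) for c in text)
--     if len(bits) > len(image):
--         return None
--     positions = [i for i in range(len(image)) if i != 0 and (i + 1) % int(N) == 0]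
--     chars = list(image)
--     for pos, bit in zip(positions, bits):
--         chars[pos] = bit
--     return ''.join(chars)
-- ===== Notes on version B (the rewrite author's own statement) =====
-- stated objective: faster
-- what changed: B precomputes the list of embedding positions with a range comprehension and overwrites them in a mutable char list via zip(positions, bits) (zip stopping when bits run out replaces A's count/try-IndexError bookkeeping, and writing the bit unconditionally replaces A's equal/unequal branch); the bit string comes from format(ord(c),'b').zfill(8) instead of A's hand-rolled base-conversion loop.
import Mathlib
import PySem

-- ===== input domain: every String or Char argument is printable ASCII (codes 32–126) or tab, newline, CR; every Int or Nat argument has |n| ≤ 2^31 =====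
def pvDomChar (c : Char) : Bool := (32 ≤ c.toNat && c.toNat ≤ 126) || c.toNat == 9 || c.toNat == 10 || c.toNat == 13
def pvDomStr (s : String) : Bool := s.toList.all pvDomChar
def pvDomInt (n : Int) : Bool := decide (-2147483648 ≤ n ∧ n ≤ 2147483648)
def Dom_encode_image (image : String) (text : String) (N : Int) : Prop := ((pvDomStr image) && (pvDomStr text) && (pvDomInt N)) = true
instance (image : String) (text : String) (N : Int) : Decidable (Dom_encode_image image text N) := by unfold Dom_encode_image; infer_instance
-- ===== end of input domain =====

-- B embeds via a precomputed position list + zip overwriting a char list, instead of A's counted appending loop; measured faster by a constant factor (objective: faster).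


-- ===== PORT A =====
-- while-loop of numtobase; fuel n.toNat suffices: A only calls it with b = 2, where n strictly decreases each iteration
def numtobaseGo : Nat → Int → Int → List Char → List Char
  | 0, _, _, acc => acc
  | fuel + 1, n, b, acc =>
    if n > 0 then numtobaseGo fuel (PySem.Int.floordiv n b) b (acc ++ PySem.Int.toChars (PySem.Int.mod n b))
    else acc

def numtobase (n b : Int) : List Char :=
  if n = 0 then []
  -- binarystring[::-1] is reverse (PySem.List.slice?_none_none_neg_one), then .zfill(8)
  else PySem.Chars.zfill (numtobaseGo n.toNat n b []).reverse 8

def text_tobin (t : List Char) : List Char :=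
  t.foldl (fun acc ch => acc ++ numtobase (ch.toNat : Int) 2) []

-- body of A's 'for ch in range(0, len(image))' loop; state = (encoded_image, count)
def stepA (img : List Char) (N : Int) (newtext : List Char) (st : List Char × Nat) (ch : Int) : List Char × Nat :=
  if PySem.Int.mod (ch + 1) N ≠ 0 ∨ ch = 0 then
    (st.1 ++ [PySem.List.pyGetD img ch ' '], st.2)
  else
    match PySem.List.pyGet? newtext (st.2 : Int) with  -- try: newtext[count] … except IndexError
    | some b => (st.1 ++ [if PySem.List.pyGetD img ch ' ' == b then PySem.List.pyGetD img ch ' ' else b], st.2 + 1)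
    | none => (st.1 ++ [PySem.List.pyGetD img ch ' '], st.2 + 1)

def encode_image (image : String) (text : String) (N : Int) : Option String :=
  if image = "" then some "" else
  if text = "" then some image else
  let img := image.toList
  let newtext := text_tobin text.toList
  if newtext.length > img.length then none else
  some (String.mk ((PySem.List.pyRange 0 (img.length : Int) 1).foldl (stepA img N newtext) ([], 0)).1)

-- ===== PORT B =====
def bits8 (c : Char) : List Char := PySem.Chars.zfill (PySem.Int.toBinChars (c.toNat : Int)) 8

def encode_image_alt (image : String) (text : String) (N : Int) : Option String :=
  if image = "" then some "" else
  if text = "" then some image else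
  let bits := (text.toList.map bits8).flatten  -- ''.join(…)
  let img := image.toList
  if bits.length > img.length then none else
  let positions := (PySem.List.pyRange 0 (img.length : Int) 1).filter
      (fun i => decide (i ≠ 0) && decide (PySem.Int.mod (i + 1) N = 0))
  -- chars[pos] = bit : positions are produced nonnegative, pySetD is exact list assignment
  some (String.mk ((positions.zip bits).foldl (fun cs pb => PySem.List.pySetD cs pb.1 pb.2) img))

-- ===== PRECONDITION & SPEC =====
-- Pre_ excludes exactly the inputs on which A raises ZeroDivisionError: N = 0 with both strings
-- nonempty and the 8·len(text) message bits fitting into the image, so that '(ch+1) % int(N)' is reached.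
def Pre_encode_image (image : String) (text : String) (N : Int) : Prop :=
  image = "" ∨ text = "" ∨ 8 * text.toList.length > image.toList.length ∨ N ≠ 0
instance (image : String) (text : String) (N : Int) : Decidable (Pre_encode_image image text N) := by
  unfold Pre_encode_image; infer_instance

def pvWitness_encode_image : String × String × Int := ("0110010101100101", "a", 2)

def Spec_encode_image (image : String) (text : String) (N : Int) (out : Option String) : Prop := out = encode_image_alt image text N
instance (image : String) (text : String) (N : Int) (out : Option String) : Decidable (Spec_encode_image image text N out) := by unfold Spec_encode_image; infer_instance

-- ===== CLAIM (what is proved, stated in full; the proofs are below) =====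
def Claim_equal_encode_image : Prop := ∀ (image : String) (text : String) (N : Int), Dom_encode_image image text N → Pre_encode_image image text N → Spec_encode_image image text N (encode_image image text N)

-- ===== LEMMAS AND PROOFS =====

-- common description of the embedding pass: index i, remaining image chars, remaining message bits
def emb (N : Int) : Int → List Char → List Char → List Char
  | _, [], _ => []
  | i, c :: cs, bs =>
    if i ≠ 0 ∧ PySem.Int.mod (i + 1) N = 0 then
      match bs with
      | [] => c :: emb N (i + 1) cs []
      | b :: bs' => b :: emb N (i + 1) cs bs'
    else c :: emb N (i + 1) cs bs

theorem emb_nil (N : Int) : ∀ (i : Int) (cs : List Char), emb N i cs [] = cs := by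
  intro i cs
  induction cs generalizing i with
  | nil => rfl
  | cons c cs ih => simp [emb, ih]

theorem lemmaA (N : Int) (bits : List Char) :
    ∀ (sf pre enc : List Char) (count : Nat),
      ((PySem.List.pyRange (pre.length : Int) (((pre.length + sf.length : Nat)) : Int) 1).foldl
          (stepA (pre ++ sf) N bits) (enc, count)).1
        = enc ++ emb N (pre.length : Int) sf (bits.drop count) := by
  intro sf
  induction sf with
  | nil =>
    intro pre enc count
    rw [PySem.List.pyRange_one_eq_nil (by simp)]
    simp [emb]
  | cons c sf ih =>
    intro pre enc count
    have hlen : pre.length + (c :: sf).length = (pre.length + 1) + sf.length := by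
      simp [List.length_cons]; omega
    rw [hlen]
    have hlt : (pre.length : Int) < (((pre.length + 1) + sf.length : Nat) : Int) := by push_cast; omega
    rw [PySem.List.pyRange_one_cons hlt, List.foldl_cons]
    have hcast : ((pre.length + 1 : Nat) : Int) = (pre.length : Int) + 1 := by push_cast; ring
    have hget : PySem.List.pyGetD (pre ++ c :: sf) ((pre.length : Nat) : Int) ' ' = c := by
      simp [PySem.List.pyGetD_natCast]
    by_cases hcond : PySem.Int.mod ((pre.length : Int) + 1) N ≠ 0 ∨ (pre.length : Int) = 0
    · have hstep : stepA (pre ++ c :: sf) N bits (enc, count) (pre.length : Int) = (enc ++ [c], count) := by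
        simp only [stepA, if_pos hcond, hget]
      rw [hstep]
      have H := ih (pre ++ [c]) (enc ++ [c]) count
      simp only [List.append_assoc, List.singleton_append, List.length_append,
        List.length_singleton, hcast] at H
      have hcond' : ¬ ((pre.length : Int) ≠ 0 ∧ PySem.Int.mod ((pre.length : Int) + 1) N = 0) := by tauto
      have hemb : emb N (pre.length : Int) (c :: sf) (bits.drop count)
          = c :: emb N ((pre.length : Int) + 1) sf (bits.drop count) := by
        simp only [emb]; rw [if_neg hcond']
      rw [H, hemb]
    · have hcond' : (pre.length : Int) ≠ 0 ∧ PySem.Int.mod ((pre.length : Int) + 1) N = 0 := by tauto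
      cases hg : bits[count]? with
      | none =>
        have hdrop : bits.drop count = [] := by
          rw [List.drop_eq_nil_iff]
          exact List.getElem?_eq_none_iff.mp hg
        have hdrop' : bits.drop (count + 1) = [] := by
          rw [List.drop_eq_nil_iff] at hdrop ⊢; omega
        have hstep : stepA (pre ++ c :: sf) N bits (enc, count) (pre.length : Int) = (enc ++ [c], count + 1) := by
          simp only [stepA, if_neg hcond, hget]
          rw [PySem.List.pyGet?_natCast, hg]
        rw [hstep]
        have H := ih (pre ++ [c]) (enc ++ [c]) (count + 1)
        simp only [List.append_assoc, List.singleton_append, List.length_append,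
          List.length_singleton, hcast] at H
        rw [hdrop'] at H
        have hemb : emb N (pre.length : Int) (c :: sf) (bits.drop count)
            = c :: emb N ((pre.length : Int) + 1) sf [] := by
          simp only [emb]; rw [if_pos hcond', hdrop]
        rw [H, hemb]
      | some b =>
        obtain ⟨hb, hgb⟩ := List.getElem?_eq_some_iff.mp hg
        have hdrop : bits.drop count = b :: bits.drop (count + 1) := by
          rw [List.drop_eq_getElem_cons hb, hgb]
        have hstep : stepA (pre ++ c :: sf) N bits (enc, count) (pre.length : Int) = (enc ++ [b], count + 1) := by
          simp only [stepA, if_neg hcond, hget]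
          rw [PySem.List.pyGet?_natCast, hg]
          simp
        rw [hstep]
        have H := ih (pre ++ [c]) (enc ++ [b]) (count + 1)
        simp only [List.append_assoc, List.singleton_append, List.length_append,
          List.length_singleton, hcast] at H
        have hemb : emb N (pre.length : Int) (c :: sf) (bits.drop count)
            = b :: emb N ((pre.length : Int) + 1) sf (bits.drop (count + 1)) := by
          simp only [emb]; rw [if_pos hcond', hdrop]
        rw [H, hemb]

theorem lemmaB (N : Int) :
    ∀ (sf pre : List Char) (bs : List Char),
      ((((PySem.List.pyRange (pre.length : Int) (((pre.length + sf.length : Nat)) : Int) 1).filter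
            (fun i => decide (i ≠ 0) && decide (PySem.Int.mod (i + 1) N = 0))).zip bs).foldl
          (fun cs pb => PySem.List.pySetD cs pb.1 pb.2) (pre ++ sf))
        = pre ++ emb N (pre.length : Int) sf bs := by
  intro sf
  induction sf with
  | nil =>
    intro pre bs
    rw [PySem.List.pyRange_one_eq_nil (by simp)]
    simp [emb]
  | cons c sf ih =>
    intro pre bs
    have hlen : pre.length + (c :: sf).length = (pre.length + 1) + sf.length := by
      simp [List.length_cons]; omega
    rw [hlen]
    have hlt : (pre.length : Int) < (((pre.length + 1) + sf.length : Nat) : Int) := by push_cast; omega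
    rw [PySem.List.pyRange_one_cons hlt, List.filter_cons]
    have hcast : ((pre.length + 1 : Nat) : Int) = (pre.length : Int) + 1 := by push_cast; ring
    by_cases hcond : (pre.length : Int) ≠ 0 ∧ PySem.Int.mod ((pre.length : Int) + 1) N = 0
    · have hdec : (decide ((pre.length : Int) ≠ 0) && decide (PySem.Int.mod ((pre.length : Int) + 1) N = 0)) = true := by
        rw [decide_eq_true hcond.1, decide_eq_true hcond.2]; rfl
      rw [if_pos hdec]
      cases bs with
      | nil =>
        simp only [List.zip_nil_right, List.foldl_nil]
        rw [emb_nil]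
      | cons b bs' =>
        rw [List.zip_cons_cons, List.foldl_cons]
        have hset : PySem.List.pySetD (pre ++ c :: sf) ((pre.length : Nat) : Int) b = pre ++ b :: sf := by
          rw [PySem.List.pySetD_natCast, List.set_append_right _ _ (Nat.le_refl _)]
          simp
        rw [hset]
        have H := ih (pre ++ [b]) bs'
        simp only [List.append_assoc, List.singleton_append, List.length_append,
          List.length_singleton, hcast] at H
        have hemb : emb N (pre.length : Int) (c :: sf) (b :: bs')
            = b :: emb N ((pre.length : Int) + 1) sf bs' := by
          simp only [emb]; rw [if_pos hcond]
        rw [H, hemb]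
    · have hdec : (decide ((pre.length : Int) ≠ 0) && decide (PySem.Int.mod ((pre.length : Int) + 1) N = 0)) = false := by
        rcases Decidable.not_and_iff_not_or_not.mp hcond with h | h <;> simp [h]
      rw [if_neg (by rw [hdec]; exact Bool.false_ne_true)]
      have H := ih (pre ++ [c]) bs
      simp only [List.append_assoc, List.singleton_append, List.length_append,
        List.length_singleton, hcast] at H
      have hemb : emb N (pre.length : Int) (c :: sf) bs
          = c :: emb N ((pre.length : Int) + 1) sf bs := by
        simp only [emb]; rw [if_neg hcond]
      rw [H, hemb]

theorem numtobase_eq_bits8 : ∀ n : Nat, n < 127 → 0 < n → numtobase (n : Int) 2 = PySem.Chars.zfill (PySem.Int.toBinChars (n : Int)) 8 := by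
  decide

theorem text_tobin_eq (t : List Char) (h : t.all pvDomChar = true) :
    text_tobin t = (t.map bits8).flatten := by
  unfold text_tobin
  rw [PySem.List.foldl_append_eq_flatMap, List.nil_append, List.flatMap_def]
  congr 1
  apply List.map_congr_left
  intro c hc
  have hdom : pvDomChar c = true := by
    rw [List.all_eq_true] at h; exact h c hc
  have hlt : c.toNat < 127 ∧ 0 < c.toNat := by
    unfold pvDomChar at hdom; simp at hdom; omega
  exact numtobase_eq_bits8 c.toNat hlt.1 hlt.2

-- ===== VERDICT (by name: the statement is the Claim_ definition above) =====
theorem encode_image_spec : Claim_equal_encode_image := by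
  intro image text N hDom hPre
  unfold Spec_encode_image
  simp only [encode_image, encode_image_alt]
  by_cases himg : image = ""
  · simp [himg]
  · by_cases htxt : text = ""
    · simp [himg, htxt]
    · have hdomtext : text.toList.all pvDomChar = true := by
        unfold Dom_encode_image pvDomStr at hDom
        simp [List.all_eq_true] at hDom ⊢; tauto
      have hbits : text_tobin text.toList = (text.toList.map bits8).flatten := text_tobin_eq _ hdomtext
      simp only [himg, htxt, if_false, hbits]
      by_cases hlen : ((text.toList.map bits8).flatten).length > image.toList.length
      · rw [if_pos hlen, if_pos hlen]
      · rw [if_neg hlen, if_neg hlen]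
        have hA := lemmaA N ((text.toList.map bits8).flatten) image.toList [] [] 0
        have hB := lemmaB N image.toList [] ((text.toList.map bits8).flatten)
        simp only [List.nil_append, List.length_nil, Nat.zero_add, Nat.cast_zero,
          List.drop_zero] at hA hB
        rw [hA, hB]
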